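-- pv_equiv track=rewrite | github.com/cryptobuks1/trading-mix | src/trading/data.py | streamWindow
-- ===== SOURCE A (Python) =====
-- def streamWindow(windowSize, step, data):
--     '''
--     windowSize: int, in seconds
--     step: int, in seconds
--     data: Sequence of ohlc data
--     '''
--     windows = []
--     start = data[0][0] - step
--     while True:
--         start += step
--         end = start + windowSize
--         windowData = [dp
--                       for dp in data
--                       if start <= dp[0] < end]
--         if windowData:
--             windows.append(windowData)
--         else:
--             return windows
-- ===== SOURCE B (Python) =====
-- def streamWindow(windowSize, step, data):
--     '''
--     windowSize: int, in seconds
--     step: int, in seconds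
--     data: Sequence of ohlc data
--     '''
--     s0 = data[0][0]
--     # one pass: bucket each data point into every window index k whose
--     # half-open interval [s0 + k*step, s0 + k*step + windowSize) contains it
--     buckets = {}
--     for dp in data:
--         t = dp[0]
--         hi = (t - s0) // step
--         lo = (t - s0 - windowSize) // step + 1
--         for k in range(max(lo, 0), hi + 1):  # windows before index 0 are never emitted
--             buckets.setdefault(k, []).append(dp)
--     windows = []
--     k = 0
--     while True:
--         w = buckets.get(k, [])
--         if not w:
--             return windows
--         windows.append(w)
--         k += 1
-- ===== Notes on version B (the rewrite author's own statement) =====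
-- stated objective: alternative
-- what changed: Instead of rescanning the whole data list for every window until the first empty one, B makes a single pass over the data, computing by floor division the contiguous range of window indices each point falls into and grouping points into a dict of buckets, then emits buckets 0,1,2,... until the first missing one.
-- outside the precondition, e.g. on streamWindow(1, -1, [[0, 5]]): A returns [[[0, 5]]], B returns []; on streamWindow(0, 0, [[1]]): A returns [], B raises ZeroDivisionError
import Mathlib
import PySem

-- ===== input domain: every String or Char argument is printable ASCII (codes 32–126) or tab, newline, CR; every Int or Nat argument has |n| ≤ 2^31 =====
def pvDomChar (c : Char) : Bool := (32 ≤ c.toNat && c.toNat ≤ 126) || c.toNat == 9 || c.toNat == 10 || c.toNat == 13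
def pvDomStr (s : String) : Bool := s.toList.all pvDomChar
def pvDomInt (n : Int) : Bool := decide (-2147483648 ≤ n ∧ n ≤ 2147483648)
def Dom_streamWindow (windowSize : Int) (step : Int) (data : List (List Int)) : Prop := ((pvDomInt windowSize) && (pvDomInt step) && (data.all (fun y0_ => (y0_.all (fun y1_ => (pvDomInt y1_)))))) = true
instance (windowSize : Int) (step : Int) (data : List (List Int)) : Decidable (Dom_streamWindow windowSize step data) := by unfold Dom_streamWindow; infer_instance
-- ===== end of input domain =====

-- B buckets each point once by window index (floor division) instead of rescanning
-- all data for every window; equivalence of the return values is proved for step ≥ 1.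

-- dp[0] — Python raises IndexError on an empty row (excluded by Pre_); the getD 0
-- default is only reached outside Pre_.
def pvHead0 (dp : List Int) : Int := (PySem.List.pyGet? dp 0).getD 0

-- fuel: an upper bound used only as a totality guard for the two while-True loops
-- (for step ≥ 1 the first empty window comes no later than the largest offset + 1)
def pvFuel (data : List (List Int)) (t0 : Int) : Nat :=
  (data.foldl (fun m dp => max m (pvHead0 dp - t0)) 0).toNat + 2

-- ===== PORT A =====
def streamWindowLoop (windowSize : Int) (step : Int) (data : List (List Int)) :
    Nat → Int → List (List (List Int)) → List (List (List Int))
  | 0, _, windows => windows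
  | fuel + 1, start, windows =>
    let start' := start + step                -- start += step
    let e := start' + windowSize              -- end = start + windowSize
    let windowData := data.filter (fun dp =>
      decide (start' ≤ pvHead0 dp) && decide (pvHead0 dp < e))
    if windowData ≠ [] then
      streamWindowLoop windowSize step data fuel start' (windows ++ [windowData])
    else
      windows

def streamWindow (windowSize : Int) (step : Int) (data : List (List Int)) : List (List (List Int)) :=
  match PySem.List.pyGet? data 0 with
  | none => []                                -- data[0] raises IndexError (excluded by Pre_)
  | some dp0 =>
    match PySem.List.pyGet? dp0 0 with
    | none => []                              -- data[0][0] raises IndexError (excluded by Pre_)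
    | some t0 => streamWindowLoop windowSize step data (pvFuel data t0) (t0 - step) []

-- ===== PORT B =====
def streamWindowAltBuckets (windowSize : Int) (step : Int) (t0 : Int)
    (data : List (List Int)) : PySem.Dict Int (List (List Int)) :=
  data.foldl (fun buckets dp =>
    let t := pvHead0 dp
    let hi := PySem.Int.floordiv (t - t0) step
    let lo := PySem.Int.floordiv (t - t0 - windowSize) step + 1
    (PySem.List.pyRange (max lo 0) (hi + 1) 1).foldl
      (fun buckets k => buckets.modify k [] (· ++ [dp]))   -- buckets.setdefault(k, []).append(dp)
      buckets)
    PySem.Dict.empty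

def streamWindowAltLoop (buckets : PySem.Dict Int (List (List Int))) :
    Nat → Int → List (List (List Int)) → List (List (List Int))
  | 0, _, windows => windows
  | fuel + 1, k, windows =>
    let w := buckets.getD k []
    if w = [] then windows
    else streamWindowAltLoop buckets fuel (k + 1) (windows ++ [w])

def streamWindow_alt (windowSize : Int) (step : Int) (data : List (List Int)) : List (List (List Int)) :=
  match PySem.List.pyGet? data 0 with
  | none => []                                -- data[0][0] raises IndexError (excluded by Pre_)
  | some dp0 =>
    match PySem.List.pyGet? dp0 0 with
    | none => []
    | some t0 =>
      streamWindowAltLoop (streamWindowAltBuckets windowSize step t0 data) (pvFuel data t0) 0 []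

-- ===== PRECONDITION & SPEC =====
-- Pre_ excludes exactly: empty data and empty rows (A raises IndexError on dp[0]), and
-- step ≤ 0 — there A either diverges (step = 0 with a nonempty first window), returns []
-- without reading past data[0] (step = 0, windowSize ≤ 0), or slides windows leftwards
-- (step < 0), an accidental use outside the function's stated purpose; B floor-divides
-- by step and does the natural thing only for a positive step.
def Pre_streamWindow (windowSize : Int) (step : Int) (data : List (List Int)) : Prop :=
  data ≠ [] ∧ (∀ dp ∈ data, dp ≠ []) ∧ 1 ≤ step
instance (windowSize : Int) (step : Int) (data : List (List Int)) : Decidable (Pre_streamWindow windowSize step data) := by unfold Pre_streamWindow; infer_instance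

def pvWitness_streamWindow : Int × Int × List (List Int) := (2, 1, [[0, 5], [1, 6], [3, 7]])

def Spec_streamWindow (windowSize : Int) (step : Int) (data : List (List Int)) (out : List (List (List Int))) : Prop := out = streamWindow_alt windowSize step data
instance (windowSize : Int) (step : Int) (data : List (List Int)) (out : List (List (List Int))) : Decidable (Spec_streamWindow windowSize step data out) := by unfold Spec_streamWindow; infer_instance

-- ===== CLAIM (what is proved, stated in full; the proofs are below) =====
def Claim_equal_streamWindow : Prop := ∀ (windowSize : Int) (step : Int) (data : List (List Int)), Dom_streamWindow windowSize step data → Pre_streamWindow windowSize step data → Spec_streamWindow windowSize step data (streamWindow windowSize step data)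

-- ===== LEMMAS AND PROOFS =====

-- the predicate of A's window number k
def pvPred (windowSize step t0 k : Int) (dp : List Int) : Bool :=
  decide (t0 + k * step ≤ pvHead0 dp) && decide (pvHead0 dp < t0 + k * step + windowSize)

-- filtering a Nodup list of keys for one key
theorem pv_filter_eq_of_nodup (r : List Int) (c : Int) (h : r.Nodup) :
    r.filter (fun k => k == c) = if c ∈ r then [c] else [] := by
  induction r with
  | nil => simp
  | cons a r ih =>
    rw [List.nodup_cons] at h
    obtain ⟨ha, hr⟩ := h
    by_cases hac : a = c
    · subst hac
      simp only [List.filter_cons, BEq.rfl, if_pos, List.mem_cons, true_or]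
      rw [ih hr]
      simp [ha]
    · simp [hac, List.mem_cons, Ne.symm hac, ih hr]

-- effect of the inner bucketing fold on one key
theorem pv_inner_fold_getD (r : List Int) (hnd : r.Nodup)
    (d : PySem.Dict Int (List (List Int))) (dp : List Int) (c : Int) :
    ((r.foldl (fun b k => b.modify k [] (· ++ [dp])) d).getD c [])
      = d.getD c [] ++ (if c ∈ r then [dp] else []) := by
  have hmap : r.foldl (fun b k => b.modify k [] (· ++ [dp])) d
      = (r.map (fun k => ((k : Int), dp))).foldl (fun b p => b.modify p.1 [] (· ++ [p.2])) d := by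
    rw [List.foldl_map]
  rw [hmap, PySem.Dict.getD_foldl_modify_append]
  congr 1
  rw [List.filter_map]
  have : ((fun p : Int × List Int => p.1 == c) ∘ fun k => ((k : Int), dp)) = fun k => k == c := rfl
  rw [this, pv_filter_eq_of_nodup r c hnd]
  by_cases hc : c ∈ r <;> simp [hc]

-- bucket characterization: bucket k holds exactly A's window-k filter, in data order
theorem pv_buckets_getD (windowSize step t0 : Int) (hstep : 0 < step)
    (data : List (List Int)) (d : PySem.Dict Int (List (List Int))) (c : Int) (hc : 0 ≤ c) :
    ((data.foldl (fun buckets dp =>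
        (PySem.List.pyRange (max (PySem.Int.floordiv (pvHead0 dp - t0 - windowSize) step + 1) 0)
          (PySem.Int.floordiv (pvHead0 dp - t0) step + 1) 1).foldl
          (fun buckets k => buckets.modify k [] (· ++ [dp])) buckets) d).getD c [])
      = d.getD c [] ++ data.filter (pvPred windowSize step t0 c) := by
  induction data generalizing d with
  | nil => simp
  | cons dp rest ih =>
    rw [List.foldl_cons, ih, pv_inner_fold_getD _ (PySem.List.nodup_pyRange_one _ _) d dp c,
      List.append_assoc]
    congr 1
    rw [List.filter_cons]
    have hmem : (c ∈ PySem.List.pyRange (max (PySem.Int.floordiv (pvHead0 dp - t0 - windowSize) step + 1) 0)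
        (PySem.Int.floordiv (pvHead0 dp - t0) step + 1) 1)
        ↔ (pvPred windowSize step t0 c dp = true) := by
      rw [PySem.List.mem_pyRange_one]
      unfold pvPred
      rw [Bool.and_eq_true, decide_eq_true_iff, decide_eq_true_iff]
      constructor
      · rintro ⟨h1, h2⟩
        rw [max_le_iff] at h1
        have h1' : PySem.Int.floordiv (pvHead0 dp - t0 - windowSize) step < c := by omega
        have h2' : c ≤ PySem.Int.floordiv (pvHead0 dp - t0) step := by omega
        rw [PySem.Int.floordiv_lt_iff_lt_mul hstep] at h1'
        rw [PySem.Int.le_floordiv_iff_mul_le hstep] at h2'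
        constructor <;> nlinarith
      · rintro ⟨h1, h2⟩
        have h1' : c * step ≤ pvHead0 dp - t0 := by omega
        have h2' : pvHead0 dp - t0 - windowSize < c * step := by omega
        rw [← PySem.Int.le_floordiv_iff_mul_le hstep] at h1'
        rw [← PySem.Int.floordiv_lt_iff_lt_mul hstep] at h2'
        rw [max_le_iff]
        omega
    by_cases hc : pvPred windowSize step t0 c dp = true
    · rw [if_pos (hmem.mpr hc), if_pos hc]; rfl
    · rw [if_neg (fun h => hc (hmem.mp h)), if_neg hc]; simp

-- the two loops step in lockstep once the buckets are characterized
theorem pv_loops_eq (windowSize step t0 : Int) (data : List (List Int))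
    (buckets : PySem.Dict Int (List (List Int)))
    (hb : ∀ c, 0 ≤ c → buckets.getD c [] = data.filter (pvPred windowSize step t0 c)) :
    ∀ (fuel : Nat) (k start : Int) (acc : List (List (List Int))),
      0 ≤ k → start + step = t0 + k * step →
      streamWindowLoop windowSize step data fuel start acc
        = streamWindowAltLoop buckets fuel k acc := by
  intro fuel
  induction fuel with
  | zero => intro k start acc _ _; rfl
  | succ f ih =>
    intro k start acc hk hstart
    show (if data.filter (fun dp => decide (start + step ≤ pvHead0 dp)
            && decide (pvHead0 dp < start + step + windowSize)) ≠ [] then _ else acc)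
        = (if buckets.getD k [] = [] then acc else _)
    have hfilt : data.filter (fun dp => decide (start + step ≤ pvHead0 dp)
        && decide (pvHead0 dp < start + step + windowSize)) = buckets.getD k [] := by
      rw [hb k hk]
      apply List.filter_congr
      intro dp _
      unfold pvPred
      rw [hstart]
    rw [hfilt]
    by_cases hw : buckets.getD k [] = []
    · simp [hw]
    · rw [if_pos hw, if_neg hw]
      exact ih (k + 1) (start + step) (acc ++ [buckets.getD k []]) (by omega) (by ring_nf; ring_nf at hstart; linarith)

-- ===== VERDICT (by name: the statement is the Claim_ definition above) =====
theorem streamWindow_spec : Claim_equal_streamWindow := by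
  intro windowSize step data _hdom hpre
  obtain ⟨_, _, hstep⟩ := hpre
  unfold Spec_streamWindow
  cases hd0 : PySem.List.pyGet? data 0 with
  | none => simp [streamWindow, streamWindow_alt, hd0]
  | some dp0 =>
    cases ht0 : PySem.List.pyGet? dp0 0 with
    | none => simp [streamWindow, streamWindow_alt, hd0, ht0]
    | some t0 =>
      simp only [streamWindow, streamWindow_alt, hd0, ht0]
      apply pv_loops_eq windowSize step t0 data _ _ (pvFuel data t0) 0 (t0 - step) [] (by omega) (by ring)
      intro c hc
      have := pv_buckets_getD windowSize step t0 (by omega) data PySem.Dict.empty c hc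
      unfold streamWindowAltBuckets
      simpa using this
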